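-- pv_equiv track=rewrite | github.com/mxs3203/MachineLearning2018 | handin3/handin_v4.py | count_r
-- ===== SOURCE A (Python) =====
-- def count_r(true, pred):
--     total = tp = fp = tn = fn = 0
--     for i in range(len(true)):
--         if pred[i] == 'R' or pred[i] == 'r':
--             total = total + 1
--             if true[i] == 'R' or true[i] == 'r':
--                 tp = tp + 1
--             else:
--                 fp = fp + 1
--         if pred[i] == 'N' or pred[i] == 'n':
--             if true[i] == 'N' or true[i] == 'n' or true[i] == 'C' or true[i] == 'c':
--                 tn = tn + 1
--             else:
--                 fn = fn + 1
--     return (total, tp, fp, tn, fn)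
-- ===== SOURCE B (Python) =====
-- def count_r(true, pred):
--     n = len(true)
--     total = sum(1 for i in range(n) if pred[i] in ('R', 'r'))
--     tp = sum(1 for i in range(n) if pred[i] in ('R', 'r') and true[i] in ('R', 'r'))
--     tn = sum(1 for i in range(n) if pred[i] in ('N', 'n') and true[i] in ('N', 'n', 'C', 'c'))
--     fn = sum(1 for i in range(n) if pred[i] in ('N', 'n') and true[i] not in ('N', 'n', 'C', 'c'))
--     return (total, tp, total - tp, tn, fn)
-- ===== Notes on version B (the rewrite author's own statement) =====
-- stated objective: alternative
-- what changed: Replaces A's single loop with a mutable 5-field state by one independent 0/1-sum per metric (fp derived as total - tp), i.e. four declarative counting passes instead of one imperative accumulator loop.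
import Mathlib
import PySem

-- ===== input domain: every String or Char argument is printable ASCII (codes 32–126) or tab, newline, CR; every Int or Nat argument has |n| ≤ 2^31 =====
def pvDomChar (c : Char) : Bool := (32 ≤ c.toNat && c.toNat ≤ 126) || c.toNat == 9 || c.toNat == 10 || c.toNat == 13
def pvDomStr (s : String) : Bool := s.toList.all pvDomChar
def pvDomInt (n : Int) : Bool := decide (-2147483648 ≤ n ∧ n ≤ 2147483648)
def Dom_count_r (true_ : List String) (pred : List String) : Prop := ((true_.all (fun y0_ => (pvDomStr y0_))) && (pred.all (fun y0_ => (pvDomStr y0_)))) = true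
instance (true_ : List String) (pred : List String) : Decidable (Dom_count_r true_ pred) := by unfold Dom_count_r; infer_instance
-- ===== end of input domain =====

-- B replaces A's single accumulator loop by one independent 0/1-count per metric (fp = total - tp);
-- neither version mutates its arguments, the return value is what is compared.

-- ===== PORT A =====
def count_r_step (true_ : List String) (pred : List String)
    (s : Int × Int × Int × Int × Int) (i : Int) : Int × Int × Int × Int × Int :=
  match s with
  | (total, tp, fp, tn, fn) =>
    let p := (PySem.List.pyGet? pred i).getD ""
    let t := (PySem.List.pyGet? true_ i).getD ""
    let s1 :=
      if p = "R" ∨ p = "r" then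
        if t = "R" ∨ t = "r" then (total + 1, tp + 1, fp)
        else (total + 1, tp, fp + 1)
      else (total, tp, fp)
    let s2 :=
      if p = "N" ∨ p = "n" then
        if t = "N" ∨ t = "n" ∨ t = "C" ∨ t = "c" then (tn + 1, fn)
        else (tn, fn + 1)
      else (tn, fn)
    (s1.1, s1.2.1, s1.2.2, s2.1, s2.2)

def count_r (true_ : List String) (pred : List String) : Int × Int × Int × Int × Int :=
  (PySem.List.pyRange 0 true_.length 1).foldl (count_r_step true_ pred) (0, 0, 0, 0, 0)

-- ===== PORT B =====
def isRLbl (s : String) : Bool := s == "R" || s == "r"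
def isNLbl (s : String) : Bool := s == "N" || s == "n"
def isNegLbl (s : String) : Bool := s == "N" || s == "n" || s == "C" || s == "c"

def count_r_alt (true_ : List String) (pred : List String) : Int × Int × Int × Int × Int :=
  let idx := PySem.List.pyRange 0 true_.length 1
  let getP := fun i => (PySem.List.pyGet? pred i).getD ""
  let getT := fun i => (PySem.List.pyGet? true_ i).getD ""
  let total : Int := (idx.filter (fun i => isRLbl (getP i))).length
  let tp : Int := (idx.filter (fun i => isRLbl (getP i) && isRLbl (getT i))).length
  let tn : Int := (idx.filter (fun i => isNLbl (getP i) && isNegLbl (getT i))).length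
  let fn : Int := (idx.filter (fun i => isNLbl (getP i) && !isNegLbl (getT i))).length
  (total, tp, total - tp, tn, fn)

-- ===== PRECONDITION & SPEC =====
-- Pre_ excludes exactly the inputs on which the Python A raises IndexError (pred shorter than true_);
-- B raises the same IndexError there.
def Pre_count_r (true_ : List String) (pred : List String) : Prop := true_.length ≤ pred.length
instance (true_ : List String) (pred : List String) : Decidable (Pre_count_r true_ pred) := by unfold Pre_count_r; infer_instance
def pvWitness_count_r : List String × List String := (["R", "n", "c"], ["r", "N", "R"])

def Spec_count_r (true_ : List String) (pred : List String) (out : Int × Int × Int × Int × Int) : Prop := out = count_r_alt true_ pred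
instance (true_ : List String) (pred : List String) (out : Int × Int × Int × Int × Int) : Decidable (Spec_count_r true_ pred out) := by unfold Spec_count_r; infer_instance

-- ===== CLAIM (what is proved, stated in full; the proofs are below) =====
def Claim_equal_count_r : Prop := ∀ (true_ : List String) (pred : List String), Dom_count_r true_ pred → Pre_count_r true_ pred → Spec_count_r true_ pred (count_r true_ pred)

-- ===== LEMMAS AND PROOFS =====

-- One step of A's loop adds exactly B's per-index 0/1 increments (fp as the R-increment minus the tp-increment).
theorem count_r_step_eq (true_ pred : List String) (i : Int) (total tp fp tn fn : Int) :
    count_r_step true_ pred (total, tp, fp, tn, fn) i =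
    (total + (if isRLbl ((PySem.List.pyGet? pred i).getD "") = true then 1 else 0),
     tp + (if (isRLbl ((PySem.List.pyGet? pred i).getD "") && isRLbl ((PySem.List.pyGet? true_ i).getD "")) = true then 1 else 0),
     fp + ((if isRLbl ((PySem.List.pyGet? pred i).getD "") = true then 1 else 0)
            - (if (isRLbl ((PySem.List.pyGet? pred i).getD "") && isRLbl ((PySem.List.pyGet? true_ i).getD "")) = true then 1 else 0)),
     tn + (if (isNLbl ((PySem.List.pyGet? pred i).getD "") && isNegLbl ((PySem.List.pyGet? true_ i).getD "")) = true then 1 else 0),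
     fn + (if (isNLbl ((PySem.List.pyGet? pred i).getD "") && !isNegLbl ((PySem.List.pyGet? true_ i).getD "")) = true then 1 else 0)) := by
  unfold count_r_step
  dsimp only
  generalize (PySem.List.pyGet? pred i).getD "" = p
  generalize (PySem.List.pyGet? true_ i).getD "" = t
  have l1 : (p = "R" ∨ p = "r") ↔ isRLbl p = true := by simp [isRLbl]
  have l2 : (t = "R" ∨ t = "r") ↔ isRLbl t = true := by simp [isRLbl]
  have l3 : (p = "N" ∨ p = "n") ↔ isNLbl p = true := by simp [isNLbl]
  have l4 : (t = "N" ∨ t = "n" ∨ t = "C" ∨ t = "c") ↔ isNegLbl t = true := by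
    simp [isNegLbl, or_assoc]
  simp only [l1, l2, l3, l4]
  generalize isRLbl p = a
  generalize isRLbl t = b
  generalize isNLbl p = c
  generalize isNegLbl t = d
  cases a <;> cases b <;> cases c <;> cases d <;>
    simp only [Bool.and_true, Bool.and_false, Bool.true_and, Bool.false_and, Bool.not_true,
      Bool.not_false, Bool.false_eq_true, eq_self_iff_true, if_true, if_false] <;>
    simp only [Prod.mk.injEq, true_and, and_true, add_zero] <;>
    first | trivial | omega

-- Invariant of A's fold over any index list: its state is the start state plus B's filter-counts.
theorem count_r_fold_eq (true_ pred : List String) (l : List Int) :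
    ∀ (total tp fp tn fn : Int),
    l.foldl (count_r_step true_ pred) (total, tp, fp, tn, fn) =
    (total + ((l.filter (fun i => isRLbl ((PySem.List.pyGet? pred i).getD ""))).length : Int),
     tp + ((l.filter (fun i => isRLbl ((PySem.List.pyGet? pred i).getD "") && isRLbl ((PySem.List.pyGet? true_ i).getD ""))).length : Int),
     fp + (((l.filter (fun i => isRLbl ((PySem.List.pyGet? pred i).getD ""))).length : Int)
           - ((l.filter (fun i => isRLbl ((PySem.List.pyGet? pred i).getD "") && isRLbl ((PySem.List.pyGet? true_ i).getD ""))).length : Int)),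
     tn + ((l.filter (fun i => isNLbl ((PySem.List.pyGet? pred i).getD "") && isNegLbl ((PySem.List.pyGet? true_ i).getD ""))).length : Int),
     fn + ((l.filter (fun i => isNLbl ((PySem.List.pyGet? pred i).getD "") && !isNegLbl ((PySem.List.pyGet? true_ i).getD ""))).length : Int)) := by
  induction l with
  | nil =>
    intro total tp fp tn fn
    simp only [List.foldl_nil, List.filter_nil, List.length_nil, Nat.cast_zero, Prod.mk.injEq]
    omega
  | cons i l ih =>
    intro total tp fp tn fn
    rw [List.foldl_cons, count_r_step_eq, ih]
    simp only [List.filter_cons]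
    generalize isRLbl ((PySem.List.pyGet? pred i).getD "") = a
    generalize isRLbl ((PySem.List.pyGet? true_ i).getD "") = b
    generalize isNLbl ((PySem.List.pyGet? pred i).getD "") = c
    generalize isNegLbl ((PySem.List.pyGet? true_ i).getD "") = d
    cases a <;> cases b <;> cases c <;> cases d <;>
      simp only [Bool.and_true, Bool.and_false, Bool.true_and, Bool.false_and, Bool.not_true,
        Bool.not_false, Bool.false_eq_true, eq_self_iff_true, if_true, if_false] <;>
      simp only [List.length_cons, Nat.cast_add, Nat.cast_one, Prod.mk.injEq, true_and, and_true,
        add_zero] <;>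
      first | trivial | omega

theorem count_r_eq_alt (true_ pred : List String) : count_r true_ pred = count_r_alt true_ pred := by
  unfold count_r count_r_alt
  dsimp only
  rw [count_r_fold_eq]
  simp only [zero_add]

-- ===== VERDICT (by name: the statement is the Claim_ definition above) =====
theorem count_r_spec : Claim_equal_count_r := by
  intro true_ pred _hdom _hpre
  unfold Spec_count_r
  exact count_r_eq_alt true_ pred
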